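-- pv_equiv track=rewrite | github.com/biobricks-ai/toxtransformer | streamlit_app.py | categorize_predictions
-- ===== SOURCE A (Python) =====
-- from typing import List, Dict, Optional
--
-- def categorize_predictions(predictions: List[Dict]) -> Dict[str, List[Dict]]:
--     """Group predictions by category."""
--     categories = {}
--     for pred in predictions:
--         cat = pred.get("category", "Other")
--         if cat not in categories:
--             categories[cat] = []
--         categories[cat].append(pred)
--     return categories
-- ===== SOURCE B (Python) =====
-- from typing import List, Dict
--
-- def categorize_predictions(predictions: List[Dict]) -> Dict[str, List[Dict]]:
--     """Group predictions by category: distinct keys first, then one filter per key."""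
--     keys = []
--     for pred in predictions:
--         cat = pred.get("category", "Other")
--         if cat not in keys:
--             keys.append(cat)
--     return {cat: [p for p in predictions if p.get("category", "Other") == cat]
--             for cat in keys}
-- ===== Notes on version B (the rewrite author's own statement) =====
-- stated objective: alternative
-- what changed: Replaces the single grouping loop with a growing dict by a two-phase scheme: one pass collecting the distinct categories in first-occurrence order, then a dict comprehension that filters the whole list once per category.
import Mathlib
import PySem

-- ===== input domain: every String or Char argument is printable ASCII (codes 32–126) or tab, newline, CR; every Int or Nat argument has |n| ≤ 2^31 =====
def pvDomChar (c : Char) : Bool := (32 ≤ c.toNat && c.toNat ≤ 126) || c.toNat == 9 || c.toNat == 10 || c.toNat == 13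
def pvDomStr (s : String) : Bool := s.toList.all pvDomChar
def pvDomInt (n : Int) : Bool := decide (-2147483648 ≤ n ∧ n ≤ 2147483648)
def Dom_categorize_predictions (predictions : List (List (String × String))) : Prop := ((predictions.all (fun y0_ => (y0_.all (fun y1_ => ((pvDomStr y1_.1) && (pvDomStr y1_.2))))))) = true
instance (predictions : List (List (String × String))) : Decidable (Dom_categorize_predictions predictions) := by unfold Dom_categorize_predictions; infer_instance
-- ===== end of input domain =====

-- B replaces A's single grouping loop (growing dict, per-element append) by a two-phase
-- scheme: collect the distinct categories in first-occurrence order, then one filter of the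
-- whole list per category (objective: alternative decomposition, same result).

-- shared helper: pred.get("category", "Other")
def pvCatOf (pred : List (String × String)) : String :=
  (PySem.Dict.mk pred).getD "category" "Other"

-- ===== PORT A =====
-- loop body of A: ensure the key exists, then append pred to categories[cat]
def pvStepA (categories : PySem.Dict String (List (List (String × String))))
    (pred : List (String × String)) : PySem.Dict String (List (List (String × String))) :=
  (if categories.contains (pvCatOf pred) then categories
   else categories.insert (pvCatOf pred) []).modify (pvCatOf pred) [] (fun l => l ++ [pred])

def categorize_predictions (predictions : List (List (String × String))) :
    List (String × List (List (String × String))) :=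
  (predictions.foldl pvStepA PySem.Dict.empty).items

-- ===== PORT B =====
def categorize_predictions_alt (predictions : List (List (String × String))) :
    List (String × List (List (String × String))) :=
  let keys := predictions.foldl (fun ks pred => PySem.Set.add ks (pvCatOf pred))
    (PySem.Set.empty : PySem.Set String)
  keys.map (fun cat => (cat, predictions.filter (fun p => pvCatOf p == cat)))

-- ===== PRECONDITION & SPEC =====
def Spec_categorize_predictions (predictions : List (List (String × String))) (out : List (String × List (List (String × String)))) : Prop := out = categorize_predictions_alt predictions
instance (predictions : List (List (String × String))) (out : List (String × List (List (String × String)))) : Decidable (Spec_categorize_predictions predictions out) := by unfold Spec_categorize_predictions; infer_instance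

-- ===== CLAIM (what is proved, stated in full; the proofs are below) =====
def Claim_equal_categorize_predictions : Prop := ∀ (predictions : List (List (String × String))), Dom_categorize_predictions predictions → Spec_categorize_predictions predictions (categorize_predictions predictions)

-- ===== LEMMAS AND PROOFS =====

-- Invariant of A's fold: after processing `done`, the dict's keys are the distinct
-- categories of `done` (first-occurrence order) and each value is the filter of `done`.
theorem pvFoldA_inv (rest : List (List (String × String))) :
    ∀ (done : List (List (String × String)))
      (d : PySem.Dict String (List (List (String × String)))),
      d.keys = PySem.Set.ofList (done.map pvCatOf) →
      (∀ c, d.getD c [] = done.filter (fun p => pvCatOf p == c)) →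
      (rest.foldl pvStepA d).keys = PySem.Set.ofList ((done ++ rest).map pvCatOf) ∧
      (∀ c, (rest.foldl pvStepA d).getD c [] =
        (done ++ rest).filter (fun p => pvCatOf p == c)) := by
  induction rest with
  | nil => intro done d hk hv; simpa using ⟨hk, hv⟩
  | cons p rest ih =>
    intro done d hk hv
    have hmain := ih (done ++ [p]) (pvStepA d p) ?_ ?_
    · simpa using hmain
    · -- keys after one step
      unfold pvStepA
      by_cases hc : d.contains (pvCatOf p) = true
      · have hmem : pvCatOf p ∈ PySem.Set.ofList (done.map pvCatOf) := by
          rw [← hk]; exact (PySem.Dict.contains_iff_mem_keys d _).mp hc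
        rw [if_pos hc, PySem.Dict.keys_modify,
          PySem.Dict.keys_insert_of_contains _ _ hc, hk]
        simp [PySem.Set.ofList_append, PySem.Set.update, PySem.Set.add,
          PySem.Set.contains, hmem]
      · have hc' : d.contains (pvCatOf p) = false := by simpa using hc
        have hmem : pvCatOf p ∉ PySem.Set.ofList (done.map pvCatOf) := by
          rw [← hk]; exact fun h => hc ((PySem.Dict.contains_iff_mem_keys d _).mpr h)
        rw [if_neg (by simp [hc']), PySem.Dict.keys_modify,
          PySem.Dict.keys_insert_of_contains _ _ (PySem.Dict.contains_insert_self ..),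
          PySem.Dict.keys_insert_of_not_contains _ _ hc', hk]
        simp [PySem.Set.ofList_append, PySem.Set.update, PySem.Set.add,
          PySem.Set.contains, hmem]
    · -- values after one step
      intro c
      unfold pvStepA
      simp only [List.filter_append, List.filter_cons, List.filter_nil]
      by_cases hc : d.contains (pvCatOf p) = true
      · rw [if_pos hc, PySem.Dict.getD_modify]
        by_cases hce : c = pvCatOf p
        · subst hce; simp [hv]
        · have hne : (pvCatOf p == c) = false := by
            rw [beq_eq_false_iff_ne]; exact fun h => hce h.symm
          simp [hce, hv c, hne]
      · have hc' : d.contains (pvCatOf p) = false := by simpa using hc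
        rw [if_neg (by simp [hc']), PySem.Dict.getD_modify]
        by_cases hce : c = pvCatOf p
        · subst hce
          rw [if_pos rfl, PySem.Dict.getD_insert_self]
          have h0 : done.filter (fun q => pvCatOf q == pvCatOf p) = [] := by
            rw [← hv (pvCatOf p)]; exact PySem.Dict.getD_of_not_contains d _ hc'
          simp [h0]
        · have hne : (pvCatOf p == c) = false := by
            rw [beq_eq_false_iff_ne]; exact fun h => hce h.symm
          rw [if_neg hce, PySem.Dict.getD_insert_of_ne d _ _ hce]
          simp [hv c, hne]

-- ===== VERDICT (by name: the statement is the Claim_ definition above) =====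
theorem categorize_predictions_spec : Claim_equal_categorize_predictions := by
  intro predictions _
  unfold Spec_categorize_predictions categorize_predictions categorize_predictions_alt
  have hinv := pvFoldA_inv predictions [] PySem.Dict.empty (by simp) (by simp)
  simp only [List.nil_append] at hinv
  obtain ⟨hk, hv⟩ := hinv
  have hnd : (predictions.foldl pvStepA PySem.Dict.empty).keys.Nodup := by
    rw [hk]; exact PySem.Set.nodup_ofList _
  rw [PySem.Dict.items_eq_map_keys _ hnd ([] : List (List (String × String)))]
  have hkeysB : predictions.foldl (fun ks pred => PySem.Set.add ks (pvCatOf pred))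
      (PySem.Set.empty : PySem.Set String) = PySem.Set.ofList (predictions.map pvCatOf) := by
    rw [← PySem.Set.update_map_eq_foldl_add]
    simp [PySem.Set.update_nil_left, PySem.Set.empty]
  rw [hk, hkeysB]
  exact List.map_congr_left fun c _ => by rw [hv c]
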